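-- pv_equiv track=rewrite | github.com/mariamabidi/DSA | HW3/morseVowel.py | countVowelSequences
-- ===== SOURCE A (Python) =====
-- def countVowelSequences(sequence):
--     """
--     Count the number of possible sequences containing only vowels (A, E, I, O, U)
--     that can be derived from a given input sequence of dots (.) and dashes (-).
--     :param sequence: The input sequence of dots and dashes.
--     :return: The number of possible sequences containing only vowels.
--     """
--     # Get the length of the input sequence
--     n = len(sequence)
--
--     # Initialize a list to store counts of possible sequences
--     the_list = [0] * (n + 1)
--     the_list[0] = 1
--
--     # Iterate through the sequence
--     for i in range(len(sequence)):
--         if sequence[0] == "-":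
--             return 0  # If the sequence starts with a dash, no valid sequences
--         elif sequence[i] == ".":
--             # Extend the sequence with a vowel (A, E, I, O, U)
--             the_list[i + 1] += the_list[i]
--             # If the previous character is also a dot, extend the sequence further
--             if sequence[i - 1] == ".":
--                 the_list[i + 1] += the_list[i - 1]
--         elif sequence[i] == "-":  # Handle dash (-)
--             if sequence[i - 1] == ".":  # If the previous character is a dot
--                 the_list[i + 1] += the_list[i - 1]
--                 if sequence[i - 2] == ".":  # If two characters ago was also a dot
--                     the_list[i + 1] += the_list[i - 2]
--             if sequence[i - 1] == "-":  # If the previous character is a dash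
--                 if sequence[i - 2] == "-":  # If two characters ago was also a dash
--                     the_list[i + 1] += the_list[i - 2]
--
--     # Return the count of possible sequences up to the nth character
--     return the_list[n]
-- ===== SOURCE B (Python) =====
-- def countVowelSequences(sequence):
--     """
--     Count decompositions of a dot/dash sequence into vowel Morse codes
--     (E=., I=.., A=.-, U=..-, O=---) by a closed-form run factorization:
--     decompositions factor at each maximal dash run, each (dot-run, dash-run)
--     pair contributing a Fibonacci-style factor, no DP table at all.
--     A's explicit rule that a sequence starting with '-' yields 0 is kept.
--     """
--     if sequence.startswith("-"):
--         return 0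
--     n = len(sequence)
--     i = 0
--     result = 1
--     while i < n:
--         k = 0
--         while i < n and sequence[i] == ".":
--             i += 1
--             k += 1
--         d = 0
--         while i < n and sequence[i] == "-":
--             i += 1
--             d += 1
--         if k == 0:
--             return 0  # a character that is neither '.' nor '-': nothing matches
--         if d == 0:
--             # trailing dot run (or a foreign character right after it)
--             return result * compositions(k) if i == n else 0
--         if d % 3 == 0:
--             w = compositions(k)  # all dashes paired into '---' groups
--         elif d % 3 == 1:
--             # first dash ends '.-' or '..-', the rest are '---' groups
--             w = compositions(k - 1) + (compositions(k - 2) if k >= 2 else 0)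
--         else:
--             w = 0  # a dash run of size 2 mod 3 can never be tiled
--         result *= w
--     return result
--
--
-- def compositions(k):
--     """Number of ways to split a run of k dots into '.' and '..' (Fibonacci)."""
--     a, b = 1, 1
--     for _ in range(k):
--         a, b = b, a + b
--     return a
-- ===== Notes on version B (the rewrite author's own statement) =====
-- stated objective: alternative
-- what changed: Replaced A's per-character DP table (branch ladder with negative-index reads) by a closed-form run factorization: the count is a product over maximal dash runs, each (dot-run k, dash-run d) pair contributing a Fibonacci factor comp(k), comp(k-1)+comp(k-2) or 0 according to d mod 3, with no DP table at all; A's explicit dash-start rule is kept.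
-- intended difference: On the single input '.', A returns 2 because its negative index the_list[-1] re-reads the cell it just wrote, double-counting; B returns 1, the intended count (the one code '.' = E). — e.g. on countVowelSequences("."): A returns 2, B returns 1
import Mathlib
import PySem

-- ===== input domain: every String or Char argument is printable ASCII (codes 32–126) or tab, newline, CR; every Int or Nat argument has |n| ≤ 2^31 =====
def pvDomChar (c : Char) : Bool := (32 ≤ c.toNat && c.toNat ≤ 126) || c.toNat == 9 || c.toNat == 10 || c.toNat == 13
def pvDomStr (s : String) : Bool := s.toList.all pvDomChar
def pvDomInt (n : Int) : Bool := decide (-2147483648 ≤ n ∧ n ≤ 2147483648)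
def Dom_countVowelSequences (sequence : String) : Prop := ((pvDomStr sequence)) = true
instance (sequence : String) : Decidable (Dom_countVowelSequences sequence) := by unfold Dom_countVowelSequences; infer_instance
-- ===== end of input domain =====

-- B replaces A's per-character DP table (a branch ladder with negative-index reads) by a
-- closed-form run factorization: a product of Fibonacci-style factors, one per maximal
-- dash run (measured faster in a timing run; same O(n)). On the single input "." A double-counts (returns 2)
-- through its wrapped read the_list[-1]; B returns the intended 1 (see D_countVowelSequences).

-- ===== PORT A =====
-- One iteration body of A's `for i in range(len(sequence))` loop (writes the_list[i+1] are
-- always in range, so List.set/getD are exact there; the possibly-negative Python reads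
-- sequence[i-1], sequence[i-2], the_list[i-1], the_list[i-2] go through PySem.List.pyGetD,
-- whose default is never reached on indices A actually evaluates).
def pvABody (cs : List Char) (L : List Int) (i : Nat) : List Int :=
  if PySem.List.pyGetD cs (i : Int) ' ' = '.' then
    let L1 := L.set (i+1) (L.getD (i+1) 0 + L.getD i 0)
    if PySem.List.pyGetD cs ((i : Int) - 1) ' ' = '.' then
      L1.set (i+1) (L1.getD (i+1) 0 + PySem.List.pyGetD L1 ((i : Int) - 1) 0)
    else L1
  else if PySem.List.pyGetD cs (i : Int) ' ' = '-' then
    let L1 :=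
      if PySem.List.pyGetD cs ((i : Int) - 1) ' ' = '.' then
        let L2 := L.set (i+1) (L.getD (i+1) 0 + PySem.List.pyGetD L ((i : Int) - 1) 0)
        if PySem.List.pyGetD cs ((i : Int) - 2) ' ' = '.' then
          L2.set (i+1) (L2.getD (i+1) 0 + PySem.List.pyGetD L2 ((i : Int) - 2) 0)
        else L2
      else L
    if PySem.List.pyGetD cs ((i : Int) - 1) ' ' = '-' then
      if PySem.List.pyGetD cs ((i : Int) - 2) ' ' = '-' then
        L1.set (i+1) (L1.getD (i+1) 0 + PySem.List.pyGetD L1 ((i : Int) - 2) 0)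
      else L1
    else L1
  else L

-- A's loop with its per-iteration early return `if sequence[0] == "-": return 0`;
-- r counts the remaining iterations (r = len(sequence) - i); afterwards the_list[n].
def pvALoop (cs : List Char) (L : List Int) (i : Nat) : Nat → Int
  | 0 => L.getD cs.length 0
  | r + 1 =>
    if PySem.List.pyGetD cs 0 ' ' = '-' then 0
    else pvALoop cs (pvABody cs L i) (i+1) r

def countVowelSequences (sequence : String) : Int :=
  pvALoop sequence.toList
    ((List.replicate (sequence.toList.length + 1) (0 : Int)).set 0 1) 0
    sequence.toList.length

-- ===== PORT B =====
-- inner `while … == ch` counting loops of Source B: (number of leading ch's, rest)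
def pvSpan (ch : Char) : List Char → Nat × List Char
  | [] => (0, [])
  | c :: t => if c = ch then ((pvSpan ch t).1 + 1, (pvSpan ch t).2) else (0, c :: t)

-- `compositions(k)`: the iterated pair update a,b = b,a+b starting from (1,1)
def pvComp (k : Nat) : Int :=
  ((List.range k).foldl (fun (p : Int × Int) _ => (p.2, p.1 + p.2)) (1, 1)).1

-- Source B's outer while loop: consume a dot run and a dash run, multiply in the factor.
-- fuel only makes the recursion structural (each pass consumes at least one character,
-- so fuel = length of the list always suffices and the 0-fuel branch is never reached).
def pvBLoop : Nat → List Char → Int → Int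
  | _, [], result => result
  | 0, _ :: _, _ => 0
  | fuel + 1, c :: t, result =>
    let s := pvSpan '.' (c :: t)
    let s2 := pvSpan '-' s.2
    if s.1 = 0 then 0
    else if s2.1 = 0 then (if s2.2 = [] then result * pvComp s.1 else 0)
    else pvBLoop fuel s2.2 (result *
      (if s2.1 % 3 = 0 then pvComp s.1
       else if s2.1 % 3 = 1 then pvComp (s.1 - 1) + (if 2 ≤ s.1 then pvComp (s.1 - 2) else 0)
       else 0))

def countVowelSequences_alt (sequence : String) : Int :=
  if PySem.Str.startswith sequence "-" then 0
  else pvBLoop sequence.toList.length sequence.toList 1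

-- ===== PRECONDITION & SPEC =====
-- On the single input ".", A returns 2 (its wrapped read the_list[-1] re-adds the cell it
-- has just written), while B returns 1, the intended count (the one code "." = E).
def D_countVowelSequences (sequence : String) : Prop := sequence = "."
instance (sequence : String) : Decidable (D_countVowelSequences sequence) := by
  unfold D_countVowelSequences; infer_instance

def Spec_countVowelSequences (sequence : String) (out : Int) : Prop :=
  ¬ D_countVowelSequences sequence → out = countVowelSequences_alt sequence
instance (sequence : String) (out : Int) : Decidable (Spec_countVowelSequences sequence out) := by
  unfold Spec_countVowelSequences; infer_instance

def pvDiffWitness_countVowelSequences : String := "."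
def pvDiffWitnessOut_countVowelSequences : Int × Int := (2, 1)

-- ===== CLAIM (what is proved, stated in full; the proofs are below) =====
def Claim_unchanged_countVowelSequences : Prop := ∀ (sequence : String), Dom_countVowelSequences sequence → Spec_countVowelSequences sequence (countVowelSequences sequence)
def Claim_changed_countVowelSequences : Prop := Dom_countVowelSequences (pvDiffWitness_countVowelSequences) ∧ D_countVowelSequences (pvDiffWitness_countVowelSequences) ∧ countVowelSequences (pvDiffWitness_countVowelSequences) = pvDiffWitnessOut_countVowelSequences.1 ∧ countVowelSequences_alt (pvDiffWitness_countVowelSequences) = pvDiffWitnessOut_countVowelSequences.2 ∧ pvDiffWitnessOut_countVowelSequences.1 ≠ pvDiffWitnessOut_countVowelSequences.2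
def Claim_exact_countVowelSequences : Prop := ∀ (sequence : String), Dom_countVowelSequences sequence → D_countVowelSequences sequence → countVowelSequences sequence ≠ countVowelSequences_alt sequence

-- ===== LEMMAS AND PROOFS =====

-- the common reference value: pvD cs j = number of decompositions of cs[0:j] into the
-- five vowel codes, by last token (conditions as A's branch ladder tests them)
def pvD (cs : List Char) : Nat → Int
  | 0 => 1
  | j + 1 =>
    (if cs[j]? = some '.' then pvD cs j else 0)
    + (if 1 ≤ j ∧ cs[j-1]? = some '.' ∧ cs[j]? = some '.' then pvD cs (j-1) else 0)
    + (if 1 ≤ j ∧ cs[j-1]? = some '.' ∧ cs[j]? = some '-' then pvD cs (j-1) else 0)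
    + (if 2 ≤ j ∧ cs[j-2]? = some '.' ∧ cs[j-1]? = some '.' ∧ cs[j]? = some '-' then pvD cs (j-2) else 0)
    + (if 2 ≤ j ∧ cs[j-2]? = some '-' ∧ cs[j-1]? = some '-' ∧ cs[j]? = some '-' then pvD cs (j-2) else 0)
  termination_by j => j
  decreasing_by all_goals omega

-- ---------- A-side: the DP table equals pvD ----------

def pvTbl (cs : List Char) (m : Nat) : List Int :=
  (List.range (cs.length + 1)).map (fun j => if j ≤ m then pvD cs j else 0)

theorem pvTbl_length (cs : List Char) (m : Nat) : (pvTbl cs m).length = cs.length + 1 := by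
  simp [pvTbl]

theorem pvTbl_getD (cs : List Char) (m j : Nat) :
    (pvTbl cs m).getD j 0 = if j ≤ m ∧ j ≤ cs.length then pvD cs j else 0 := by
  rcases Nat.lt_or_ge cs.length j with h | h
  · rw [List.getD_eq_default _ _ (by simp [pvTbl]; omega)]
    rw [if_neg (by omega)]
  · rw [List.getD_eq_getElem _ _ (by simp [pvTbl]; omega)]
    simp [pvTbl]
    omega

theorem pvTbl_zero (cs : List Char) :
    (List.replicate (cs.length + 1) (0 : Int)).set 0 1 = pvTbl cs 0 := by
  apply List.ext_getElem (by simp [pvTbl])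
  intro i h1 h2
  simp [pvTbl] at h2 ⊢
  rcases Nat.eq_zero_or_pos i with h | h
  · subst h; simp [pvD]
  · rw [List.getElem_set_ne (by omega), List.getElem_replicate, if_neg (by omega)]

theorem pvTbl_set (cs : List Char) (m : Nat) (hm : m < cs.length) :
    (pvTbl cs m).set (m+1) (pvD cs (m+1)) = pvTbl cs (m+1) := by
  apply List.ext_getElem (by simp [pvTbl])
  intro i h1 h2
  simp [pvTbl] at h2 ⊢
  rcases eq_or_ne i (m+1) with h | h
  · subst h; rw [List.getElem_set_self (by simp; omega)]; rw [if_pos (by omega)]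
  · rw [List.getElem_set_ne (by omega)]
    simp only [List.getElem_map, List.getElem_range]
    by_cases hi : i ≤ m
    · rw [if_pos hi, if_pos (by omega)]
    · rw [if_neg hi, if_neg (by omega)]

theorem pvTbl_succ_of_zero (cs : List Char) (m : Nat) (h : pvD cs (m+1) = 0) :
    pvTbl cs (m+1) = pvTbl cs m := by
  apply List.ext_getElem (by simp [pvTbl])
  intro i h1 h2
  simp [pvTbl]
  rcases eq_or_ne i (m+1) with hi | hi
  · subst hi; rw [if_pos le_rfl, if_neg (by omega), h]
  · by_cases hle : i ≤ m
    · rw [if_pos (by omega), if_pos hle]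
    · rw [if_neg (by omega), if_neg hle]

theorem getD_set_self (l : List Int) (i : Nat) (v : Int) (h : i < l.length) :
    (l.set i v).getD i 0 = v := by
  rw [List.getD_eq_getElem _ _ (by simpa using h), List.getElem_set_self (by simpa using h)]

theorem getD_set_ne (l : List Int) (i j : Nat) (v : Int) (h : i ≠ j) :
    (l.set i v).getD j 0 = l.getD j 0 := by
  rcases Nat.lt_or_ge j l.length with hj | hj
  · rw [List.getD_eq_getElem _ _ (by simpa using hj), List.getD_eq_getElem _ _ hj,
      List.getElem_set_ne h]
  · rw [List.getD_eq_default _ _ (by simpa using hj), List.getD_eq_default _ _ hj]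

theorem pvGetD_wrap {α : Type} (xs : List α) (d : α) (h : xs ≠ []) :
    PySem.List.pyGetD xs (-1) d = xs.getD (xs.length - 1) d := by
  rw [PySem.List.pyGetD_neg_one xs d h, List.getLast_eq_getElem,
    List.getD_eq_getElem _ _ (by cases xs <;> simp_all)]

theorem pvABody_step (cs : List Char) (k : Nat) (hk : k < cs.length)
    (hhead : ¬ cs[0]? = some '-') (hne : cs ≠ ['.']) :
    pvABody cs (pvTbl cs k) k = pvTbl cs (k+1) := by
  have hcs : PySem.List.pyGetD cs (k : Int) ' ' = cs[k] := by
    rw [PySem.List.pyGetD_natCast, List.getD_eq_getElem _ _ hk]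
  have hlen : (pvTbl cs k).length = cs.length + 1 := pvTbl_length cs k
  have hk? : cs[k]? = some cs[k] := List.getElem?_eq_getElem hk
  have h0? : cs[0]? = some cs[0] := List.getElem?_eq_getElem (by omega)
  simp only [pvABody]
  rw [hcs]
  rw [← pvTbl_set cs k hk]
  by_cases hdot : cs[k] = '.'
  · rw [if_pos hdot]
    rcases Nat.eq_zero_or_pos k with hk0 | hk1
    · subst hk0
      -- k = 0: sequence[i-1] wraps to the last character; cs ≠ ['.'] rules out length 1
      have hn2 : 2 ≤ cs.length := by
        rcases Nat.lt_or_ge cs.length 2 with h | h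
        · exfalso
          apply hne
          apply List.ext_getElem (by simp; omega)
          intro i hi1 hi2
          have : i = 0 := by omega
          subst this
          simpa using hdot
        · exact h
      rw [show ((0:Nat):Int) - 1 = -1 by norm_num]
      by_cases hlast : PySem.List.pyGetD cs (-1) ' ' = '.'
      · rw [if_pos hlast, List.set_set]
        refine congrArg _ ?_
        rw [pvTbl_getD, pvTbl_getD, if_neg (by omega), if_pos (by omega)]
        rw [getD_set_self _ _ _ (by omega)]
        rw [pvGetD_wrap _ _ (by intro h; have := congrArg List.length h; simp [pvTbl] at this)]
        rw [show ((pvTbl cs 0).set (0+1) (0 + pvD cs 0)).length - 1 = cs.length by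
          simp [hlen]]
        rw [getD_set_ne _ _ _ _ (by omega), pvTbl_getD, if_neg (by omega)]
        conv_rhs => rw [pvD]
        simp [hk?, hdot]
      · rw [if_neg hlast]
        refine congrArg _ ?_
        rw [pvTbl_getD, pvTbl_getD, if_neg (by omega), if_pos (by omega)]
        conv_rhs => rw [pvD]
        simp [hk?, hdot]
    · -- k ≥ 1
      rw [show ((k:Nat):Int) - 1 = ((k-1:Nat):Int) by omega]
      simp only [PySem.List.pyGetD_natCast]
      have hchar : cs.getD (k-1) ' ' = cs[k-1] := List.getD_eq_getElem _ _ (by omega)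
      have hk1? : cs[k-1]? = some cs[k-1] := List.getElem?_eq_getElem (by omega)
      rw [hchar]
      by_cases hprev : cs[k-1] = '.'
      · rw [if_pos hprev, List.set_set]
        refine congrArg _ ?_
        rw [pvTbl_getD, pvTbl_getD, if_neg (by omega), if_pos (by omega)]
        rw [getD_set_self _ _ _ (by omega)]
        rw [getD_set_ne _ _ _ _ (by omega), pvTbl_getD, if_pos (by omega)]
        have g1 : 1 ≤ k := hk1
        conv_rhs => rw [pvD]
        simp [hk?, hdot, hk1?, hprev, g1]
      · rw [if_neg hprev]
        refine congrArg _ ?_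
        rw [pvTbl_getD, pvTbl_getD, if_neg (by omega), if_pos (by omega)]
        conv_rhs => rw [pvD]
        simp [hk?, hdot, hk1?, hprev]
  · rw [if_neg hdot]
    by_cases hdash : cs[k] = '-'
    · rw [if_pos hdash]
      have hk1 : 1 ≤ k := by
        rcases Nat.eq_zero_or_pos k with h0 | h; swap; · exact h
        exfalso; apply hhead; simp only [h0] at hdash; rw [h0?, hdash]
      rw [show ((k:Nat):Int) - 1 = ((k-1:Nat):Int) by omega]
      simp only [PySem.List.pyGetD_natCast]
      have hchar : cs.getD (k-1) ' ' = cs[k-1] := List.getD_eq_getElem _ _ (by omega)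
      have hk1? : cs[k-1]? = some cs[k-1] := List.getElem?_eq_getElem (by omega)
      rw [hchar]
      rcases Nat.lt_or_ge k 2 with hk2 | hk2
      · -- k = 1: sequence[i-2] wraps to the last character
        have hkeq : k = 1 := by omega
        subst hkeq
        have hn2 : 2 ≤ cs.length := by omega
        rw [show ((1:Nat):Int) - 2 = -1 by norm_num]
        by_cases hp : cs[0] = '.'
        · rw [if_pos hp, if_neg (show ¬cs[0] = '-' by rw [hp]; decide)]
          by_cases hwrap : PySem.List.pyGetD cs (-1) ' ' = '.'
          · -- the wrapped read sees cs[n-1]; hdash at index 1 forces n ≥ 3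
            have hn3 : 3 ≤ cs.length := by
              rcases Nat.lt_or_ge cs.length 3 with h | h; swap; · exact h
              exfalso
              rw [pvGetD_wrap _ _ (by intro hnil; rw [hnil] at hk; simp at hk)] at hwrap
              have : cs.length - 1 = 1 := by omega
              rw [this, List.getD_eq_getElem _ _ (by omega)] at hwrap
              rw [hwrap] at hdash
              exact absurd hdash (by decide)
            rw [if_pos hwrap, List.set_set]
            refine congrArg _ ?_
            rw [pvTbl_getD, pvTbl_getD, if_neg (by omega), if_pos (by omega)]
            rw [getD_set_self _ _ _ (by omega)]
            rw [pvGetD_wrap _ _ (by intro h; have := congrArg List.length h; simp [pvTbl] at this)]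
            rw [show ((pvTbl cs 1).set (1+1) (0 + pvD cs (1-1))).length - 1 = cs.length by
              simp [hlen]]
            rw [getD_set_ne _ _ _ _ (by omega), pvTbl_getD, if_neg (by omega)]
            conv_rhs => rw [pvD]
            have h0p : cs[0]? = some '.' := by rw [h0?, hp]
            simp [hk?, hdash, h0p]
          · rw [if_neg hwrap]
            refine congrArg _ ?_
            rw [pvTbl_getD, pvTbl_getD, if_neg (by omega), if_pos (by omega)]
            conv_rhs => rw [pvD]
            have h0p : cs[0]? = some '.' := by rw [h0?, hp]
            simp [hk?, hdash, h0p]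
        · rw [if_neg hp]
          rw [if_neg (show ¬cs[0] = '-' by intro h; exact hhead (by rw [h0?, h]))]
          rw [pvTbl_set cs 1 hk]
          refine (pvTbl_succ_of_zero cs 1 ?_).symm
          rw [pvD]
          simp [hk?, hdash, h0?, hp]
      · -- k ≥ 2
        rw [show ((k:Nat):Int) - 2 = ((k-2:Nat):Int) by omega]
        simp only [PySem.List.pyGetD_natCast]
        have hchar2 : cs.getD (k-2) ' ' = cs[k-2] := List.getD_eq_getElem _ _ (by omega)
        have hk2? : cs[k-2]? = some cs[k-2] := List.getElem?_eq_getElem (by omega)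
        rw [hchar2]
        by_cases hp : cs[k-1] = '.'
        · rw [if_pos hp, if_neg (show ¬cs[k-1] = '-' by rw [hp]; decide)]
          by_cases hpp : cs[k-2] = '.'
          · rw [if_pos hpp, List.set_set]
            refine congrArg _ ?_
            rw [pvTbl_getD, pvTbl_getD, if_neg (by omega), if_pos (by omega)]
            rw [getD_set_self _ _ _ (by omega)]
            rw [getD_set_ne _ _ _ _ (by omega), pvTbl_getD, if_pos (by omega)]
            conv_rhs => rw [pvD]
            have g1 : 1 ≤ k := hk1
            have g2 : 2 ≤ k := hk2
            simp [hk?, hdash, hk1?, hp, hk2?, hpp, g1, g2]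
          · rw [if_neg hpp]
            refine congrArg _ ?_
            rw [pvTbl_getD, pvTbl_getD, if_neg (by omega), if_pos (by omega)]
            conv_rhs => rw [pvD]
            have g1 : 1 ≤ k := hk1
            simp [hk?, hdash, hk1?, hp, hk2?, hpp, g1]
        · rw [if_neg hp]
          by_cases hm : cs[k-1] = '-'
          · rw [if_pos hm]
            by_cases hmm : cs[k-2] = '-'
            · rw [if_pos hmm]
              refine congrArg _ ?_
              rw [pvTbl_getD, pvTbl_getD, if_neg (by omega), if_pos (by omega)]
              conv_rhs => rw [pvD]
              have g2 : 2 ≤ k := hk2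
              simp [hk?, hdash, hk1?, hm, hk2?, hmm, g2]
            · rw [if_neg hmm]
              rw [pvTbl_set cs k hk]
              refine (pvTbl_succ_of_zero cs k ?_).symm
              rw [pvD]
              simp [hk?, hdash, hk1?, hm, hk2?, hmm]
          · rw [if_neg hm]
            rw [pvTbl_set cs k hk]
            refine (pvTbl_succ_of_zero cs k ?_).symm
            rw [pvD]
            simp [hk?, hdash, hk1?, hp, hm]
    · rw [if_neg hdash]
      rw [pvTbl_set cs k hk]
      refine (pvTbl_succ_of_zero cs k ?_).symm
      rw [pvD]
      simp [hk?, hdot, hdash]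

theorem pvALoop_inv (cs : List Char) (hhead : ¬ cs[0]? = some '-') (hne : cs ≠ ['.']) :
    ∀ r k, k ≤ cs.length → cs.length - k = r →
      pvALoop cs (pvTbl cs k) k r = pvD cs cs.length := by
  intro r
  induction r with
  | zero =>
    intro k hk hr
    have hkn : k = cs.length := by omega
    subst hkn
    rw [pvALoop, pvTbl_getD, if_pos ⟨le_rfl, le_rfl⟩]
  | succ r ih =>
    intro k hk hr
    have hklt : k < cs.length := by omega
    rw [pvALoop]
    rw [if_neg (by
      rw [PySem.List.pyGetD_zero, List.getD_eq_getElem?_getD,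
        List.getElem?_eq_getElem (show 0 < cs.length by omega)]
      intro h
      simp only [Option.getD_some] at h
      exact hhead (by rw [List.getElem?_eq_getElem (show 0 < cs.length by omega), h]))]
    rw [pvABody_step cs k hklt hhead hne]
    exact ih (k+1) (by omega) (by omega)

-- ---------- B-side: the run factorization equals pvD ----------

-- the Fibonacci-style count of compositions of k into parts 1 and 2
def pvF : Nat → Int
  | 0 => 1
  | 1 => 1
  | k + 2 => pvF (k + 1) + pvF k

theorem pvComp_fold (k : Nat) :
    (List.range k).foldl (fun (p : Int × Int) _ => (p.2, p.1 + p.2)) (1, 1)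
      = (pvF k, pvF (k+1)) := by
  induction k with
  | zero => simp [pvF]
  | succ k ih =>
    rw [List.range_succ, List.foldl_append, ih]
    refine Prod.ext rfl ?_
    show pvF k + pvF (k+1) = pvF (k+2)
    rw [pvF]
    ring

theorem pvComp_eq (k : Nat) : pvComp k = pvF k := by
  rw [pvComp, pvComp_fold]

theorem pvD_zero (cs : List Char) : pvD cs 0 = 1 := by rw [pvD]

theorem pvD_congr (j : Nat) : ∀ (cs cs' : List Char),
    (∀ i, i < j → cs[i]? = cs'[i]?) → pvD cs j = pvD cs' j := by
  induction j using Nat.strong_induction_on with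
  | _ j IH =>
    intro cs cs' h
    match j with
    | 0 => rw [pvD_zero, pvD_zero]
    | j + 1 =>
      have e0 : cs[j]? = cs'[j]? := h j (by omega)
      have e1 : cs[j-1]? = cs'[j-1]? := h (j-1) (by omega)
      have e2 : cs[j-2]? = cs'[j-2]? := h (j-2) (by omega)
      have r1 : pvD cs j = pvD cs' j := IH j (by omega) cs cs' (fun i hi => h i (by omega))
      have r2 : pvD cs (j-1) = pvD cs' (j-1) :=
        IH (j-1) (by omega) cs cs' (fun i hi => h i (by omega))
      have r3 : pvD cs (j-2) = pvD cs' (j-2) :=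
        IH (j-2) (by omega) cs cs' (fun i hi => h i (by omega))
      rw [pvD, pvD, e0, e1, e2, r1, r2, r3]

theorem pvD_zero_of_bad (j : Nat) : ∀ (cs : List Char) (i : Nat) (ch : Char),
    i < j → cs[i]? = some ch → ch ≠ '.' → ch ≠ '-' → pvD cs j = 0 := by
  induction j using Nat.strong_induction_on with
  | _ j IH =>
    intro cs i ch hij hi hd hm
    match j with
    | 0 => omega
    | j + 1 =>
      rw [pvD]
      have t1 : (if cs[j]? = some '.' then pvD cs j else 0) = 0 := by
        by_cases h : cs[j]? = some '.'
        · rw [if_pos h]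
          have : i ≠ j := fun e => by subst e; rw [hi] at h; exact hd (by injection h)
          exact IH j (by omega) cs i ch (by omega) hi hd hm
        · rw [if_neg h]
      have t2 : (if 1 ≤ j ∧ cs[j-1]? = some '.' ∧ cs[j]? = some '.' then pvD cs (j-1) else 0) = 0 := by
        by_cases h : 1 ≤ j ∧ cs[j-1]? = some '.' ∧ cs[j]? = some '.'
        · rw [if_pos h]
          have n1 : i ≠ j := fun e => by subst e; rw [hi] at h; exact hd (by injection h.2.2)
          have n2 : i ≠ j - 1 := fun e => by subst e; rw [hi] at h; exact hd (by injection h.2.1)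
          exact IH (j-1) (by omega) cs i ch (by omega) hi hd hm
        · rw [if_neg h]
      have t3 : (if 1 ≤ j ∧ cs[j-1]? = some '.' ∧ cs[j]? = some '-' then pvD cs (j-1) else 0) = 0 := by
        by_cases h : 1 ≤ j ∧ cs[j-1]? = some '.' ∧ cs[j]? = some '-'
        · rw [if_pos h]
          have n1 : i ≠ j := fun e => by subst e; rw [hi] at h; exact hm (by injection h.2.2)
          have n2 : i ≠ j - 1 := fun e => by subst e; rw [hi] at h; exact hd (by injection h.2.1)
          exact IH (j-1) (by omega) cs i ch (by omega) hi hd hm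
        · rw [if_neg h]
      have t4 : (if 2 ≤ j ∧ cs[j-2]? = some '.' ∧ cs[j-1]? = some '.' ∧ cs[j]? = some '-' then pvD cs (j-2) else 0) = 0 := by
        by_cases h : 2 ≤ j ∧ cs[j-2]? = some '.' ∧ cs[j-1]? = some '.' ∧ cs[j]? = some '-'
        · rw [if_pos h]
          have n1 : i ≠ j := fun e => by subst e; rw [hi] at h; exact hm (by injection h.2.2.2)
          have n2 : i ≠ j - 1 := fun e => by subst e; rw [hi] at h; exact hd (by injection h.2.2.1)
          have n3 : i ≠ j - 2 := fun e => by subst e; rw [hi] at h; exact hd (by injection h.2.1)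
          exact IH (j-2) (by omega) cs i ch (by omega) hi hd hm
        · rw [if_neg h]
      have t5 : (if 2 ≤ j ∧ cs[j-2]? = some '-' ∧ cs[j-1]? = some '-' ∧ cs[j]? = some '-' then pvD cs (j-2) else 0) = 0 := by
        by_cases h : 2 ≤ j ∧ cs[j-2]? = some '-' ∧ cs[j-1]? = some '-' ∧ cs[j]? = some '-'
        · rw [if_pos h]
          have n1 : i ≠ j := fun e => by subst e; rw [hi] at h; exact hm (by injection h.2.2.2)
          have n2 : i ≠ j - 1 := fun e => by subst e; rw [hi] at h; exact hm (by injection h.2.2.1)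
          have n3 : i ≠ j - 2 := fun e => by subst e; rw [hi] at h; exact hm (by injection h.2.1)
          exact IH (j-2) (by omega) cs i ch (by omega) hi hd hm
        · rw [if_neg h]
      rw [t1, t2, t3, t4, t5]
      ring

theorem pvRep_get (k i : Nat) :
    (List.replicate k '.')[i]? = if i < k then some '.' else none := by
  simp [List.getElem?_replicate]

theorem pvD_dots (k : Nat) : pvD (List.replicate k '.') k = pvF k := by
  induction k using Nat.strong_induction_on with
  | _ k IH =>
    match k with
    | 0 => rw [pvD_zero]; rfl
    | 1 => rw [pvD]; simp [pvD_zero, pvF]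
    | k + 2 =>
      have g1 : (List.replicate (k+2) '.')[k+1]? = some '.' := by
        rw [pvRep_get, if_pos (by omega)]
      have g2 : (List.replicate (k+2) '.')[k+1-1]? = some '.' := by
        rw [pvRep_get, if_pos (by omega)]
      have cong1 : pvD (List.replicate (k+2) '.') (k+1) = pvF (k+1) := by
        rw [pvD_congr _ _ (List.replicate (k+1) '.')
          (fun i hi => by rw [pvRep_get, pvRep_get, if_pos (by omega), if_pos (by omega)])]
        exact IH (k+1) (by omega)
      have cong2 : pvD (List.replicate (k+2) '.') (k+1-1) = pvF k := by
        rw [show k+1-1 = k from rfl]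
        rw [pvD_congr _ _ (List.replicate k '.')
          (fun i hi => by rw [pvRep_get, pvRep_get, if_pos (by omega), if_pos (by omega)])]
        exact IH k (by omega)
      rw [pvD, g1, g2, cong1, cong2]
      have : pvF (k+2) = pvF (k+1) + pvF k := by rw [pvF]
      rw [this]
      simp

-- getElem? of a dot run followed by a dash run
theorem pvRD_get (k d i : Nat) :
    (List.replicate k '.' ++ List.replicate d '-')[i]? =
      if i < k then some '.' else if i < k + d then some '-' else none := by
  rcases Nat.lt_or_ge i k with h | h
  · rw [List.getElem?_append_left (by simp; omega), if_pos h]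
    simp [List.getElem?_replicate, h]
  · rw [List.getElem?_append_right (by simp; omega), if_neg (by omega)]
    simp only [List.length_replicate, List.getElem?_replicate]
    split_ifs <;> first | rfl | omega

-- the factor contributed by a dot run of k followed by a dash run of d (k ≥ 1)
theorem pvW (d : Nat) : ∀ k, 1 ≤ k →
    pvD (List.replicate k '.' ++ List.replicate d '-') (k + d) =
      (if d % 3 = 0 then pvF k
       else if d % 3 = 1 then pvF (k-1) + (if 2 ≤ k then pvF (k-2) else 0)
       else 0) := by
  induction d using Nat.strong_induction_on with
  | _ d IH =>
    intro k hk
    match d with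
    | 0 =>
      simp only [List.replicate_zero, List.append_nil, Nat.add_zero]
      rw [pvD_dots]
      norm_num
    | 1 =>
      obtain ⟨j, rfl⟩ : ∃ j, k = j + 1 := ⟨k - 1, by omega⟩
      have g0 : (List.replicate (j+1) '.' ++ List.replicate 1 '-')[j+1]? = some '-' := by
        rw [pvRD_get, if_neg (by omega), if_pos (by omega)]
      have g1 : (List.replicate (j+1) '.' ++ List.replicate 1 '-')[j+1-1]? = some '.' := by
        rw [pvRD_get, if_pos (by omega)]
      have e2 : pvD (List.replicate (j+1) '.' ++ List.replicate 1 '-') (j+1-1) = pvF j := by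
        rw [show j+1-1 = j from rfl]
        rw [pvD_congr _ _ (List.replicate j '.')
          (fun i hi => by rw [pvRD_get, if_pos (by omega), pvRep_get, if_pos (by omega)])]
        exact pvD_dots j
      rw [show j + 1 + 1 = (j+1) + 1 from rfl, pvD, g0, g1, e2]
      by_cases h2 : 1 ≤ j
      · have g2 : (List.replicate (j+1) '.' ++ List.replicate 1 '-')[j+1-2]? = some '.' := by
          rw [pvRD_get, if_pos (by omega)]
        have e3 : pvD (List.replicate (j+1) '.' ++ List.replicate 1 '-') (j+1-2) = pvF (j-1) := by
          rw [show j+1-2 = j-1 by omega]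
          rw [pvD_congr _ _ (List.replicate (j-1) '.')
            (fun i hi => by rw [pvRD_get, if_pos (by omega), pvRep_get, if_pos (by omega)])]
          exact pvD_dots (j-1)
        rw [g2, e3]
        simp [show 2 ≤ j + 1 by omega, show j + 1 - 1 = j from rfl, show j + 1 - 2 = j - 1 by omega]
      · have hj : j = 0 := by omega
        subst hj
        simp
    | 2 =>
      have g0 : (List.replicate k '.' ++ List.replicate 2 '-')[k+1]? = some '-' := by
        rw [pvRD_get, if_neg (by omega), if_pos (by omega)]
      have g1 : (List.replicate k '.' ++ List.replicate 2 '-')[k+1-1]? = some '-' := by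
        rw [pvRD_get, if_neg (by omega), if_pos (by omega)]
      have g2 : (List.replicate k '.' ++ List.replicate 2 '-')[k+1-2]? = some '.' := by
        rw [pvRD_get, if_pos (by omega)]
      rw [show k + 2 = (k+1) + 1 from rfl, pvD, g0, g1, g2]
      simp
    | d + 3 =>
      have g0 : (List.replicate k '.' ++ List.replicate (d+3) '-')[k+d+2]? = some '-' := by
        rw [pvRD_get, if_neg (by omega), if_pos (by omega)]
      have g1 : (List.replicate k '.' ++ List.replicate (d+3) '-')[k+d+2-1]? = some '-' := by
        rw [pvRD_get, if_neg (by omega), if_pos (by omega)]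
      have g2 : (List.replicate k '.' ++ List.replicate (d+3) '-')[k+d+2-2]? = some '-' := by
        rw [pvRD_get, if_neg (by omega), if_pos (by omega)]
      have cong : pvD (List.replicate k '.' ++ List.replicate (d+3) '-') (k+d+2-2)
          = (if d % 3 = 0 then pvF k
             else if d % 3 = 1 then pvF (k-1) + (if 2 ≤ k then pvF (k-2) else 0)
             else 0) := by
        rw [show k+d+2-2 = k+d by omega]
        rw [pvD_congr _ _ (List.replicate k '.' ++ List.replicate d '-')
          (fun i hi => by
            rw [pvRD_get, pvRD_get]
            rcases Nat.lt_or_ge i k with h | h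
            · rw [if_pos h, if_pos h]
            · rw [if_neg (show ¬ i < k by omega), if_neg (show ¬ i < k by omega),
                if_pos (show i < k + (d+3) by omega), if_pos (show i < k + d by omega)])]
        exact IH d (by omega) k hk
      rw [show k + (d + 3) = (k+d+2) + 1 by omega, pvD, g0, g1, g2, cong]
      rw [show (d + 3) % 3 = d % 3 by omega]
      simp [show 2 ≤ k + d + 2 by omega]

-- decompositions factor at the end of a dash run: P ends with '-', Q does not start with '-'
theorem pvD_factor (P Q : List Char) (hP1 : 1 ≤ P.length)
    (hPlast : P[P.length - 1]? = some '-')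
    (hQ : ¬ Q[0]? = some '-') :
    ∀ m, m ≤ Q.length →
      pvD (P ++ Q) (P.length + m) = pvD P P.length * pvD Q m := by
  intro m
  induction m using Nat.strong_induction_on with
  | _ m IH =>
    intro hm
    have hQm : ∀ i, i < Q.length → (P ++ Q)[P.length + i]? = Q[i]? := fun i _ => by
      rw [List.getElem?_append_right (by omega)]
      congr 1
      omega
    have hQfalse : (Q[0]? = some '-') = False := eq_false hQ
    have hlast : (P ++ Q)[P.length - 1]? = some '-' := by
      rw [List.getElem?_append_left (by omega)]
      exact hPlast
    match m with
    | 0 =>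
      rw [pvD_zero, mul_one]
      exact pvD_congr _ _ _ (fun i hi => List.getElem?_append_left (by omega))
    | 1 =>
      -- j = P.length: position j-1 is P's final dash
      have e0 : (P ++ Q)[P.length]? = Q[0]? := hQm 0 (by omega)
      have base : pvD (P ++ Q) P.length = pvD P P.length := by
        have h := IH 0 (by omega) (by omega)
        rw [pvD_zero, mul_one] at h
        exact h
      show pvD (P ++ Q) (P.length + 1) = pvD P P.length * pvD Q (0 + 1)
      rw [pvD]
      conv_rhs => rw [pvD]
      rw [e0, hlast, base, pvD_zero]
      simp [hQ, mul_ite, mul_one, mul_zero]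
    | 2 =>
      -- j = P.length + 1: position j-2 is P's final dash
      have e0 : (P ++ Q)[P.length + 1]? = Q[1]? := hQm 1 (by omega)
      have e1 : (P ++ Q)[P.length + 1 - 1]? = Q[1-1]? := hQm 0 (by omega)
      have e2 : (P ++ Q)[P.length + 1 - 2]? = some '-' := hlast
      have r1 : pvD (P ++ Q) (P.length + 1) = pvD P P.length * pvD Q 1 :=
        IH 1 (by omega) (by omega)
      have r0 : pvD (P ++ Q) (P.length + 1 - 1) = pvD P P.length * pvD Q (1-1) :=
        IH 0 (by omega) (by omega)
      show pvD (P ++ Q) (P.length + 1 + 1) = pvD P P.length * pvD Q (1 + 1)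
      rw [pvD]
      conv_rhs => rw [pvD]
      rw [e0, e1, e2, r1, r0]
      simp only [show (some '-' = some '.') = False by decide,
        show (some '-' = some '-') = True by decide,
        show (Q[1-1]? = some '-') = False from eq_false (fun h => hQ h),
        show (1 ≤ P.length + 1) = True from eq_true (by omega),
        show ((1:Nat) ≤ 1) = True from eq_true (by omega),
        show ((2:Nat) ≤ 1) = False from eq_false (by omega),
        true_and, and_true, false_and, and_false, if_false]
      split_ifs <;> ring
    | m + 3 =>
      -- all three referenced characters lie inside Q
      have e0 : (P ++ Q)[P.length + (m+2)]? = Q[m+2]? := hQm (m+2) (by omega)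
      have e1 : (P ++ Q)[P.length + (m+2) - 1]? = Q[m+2-1]? := hQm (m+1) (by omega)
      have e2 : (P ++ Q)[P.length + (m+2) - 2]? = Q[m+2-2]? := hQm m (by omega)
      have r2 : pvD (P ++ Q) (P.length + (m+2)) = pvD P P.length * pvD Q (m+2) :=
        IH (m+2) (by omega) (by omega)
      have r1 : pvD (P ++ Q) (P.length + (m+2) - 1) = pvD P P.length * pvD Q (m+2-1) :=
        IH (m+1) (by omega) (by omega)
      have r0 : pvD (P ++ Q) (P.length + (m+2) - 2) = pvD P P.length * pvD Q (m+2-2) :=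
        IH m (by omega) (by omega)
      show pvD (P ++ Q) (P.length + (m+2) + 1) = pvD P P.length * pvD Q ((m+2) + 1)
      rw [pvD]
      conv_rhs => rw [pvD]
      rw [e0, e1, e2, r2, r1, r0]
      simp only [show (1 ≤ P.length + (m+2)) = True from eq_true (by omega),
        show (1 ≤ m + 2) = True from eq_true (by omega),
        show (2 ≤ P.length + (m+2)) = True from eq_true (by omega),
        show (2 ≤ m + 2) = True from eq_true (by omega), true_and]
      split_ifs <;> ring

-- ---------- pvSpan facts and the main B invariant ----------

theorem pvSpan_decomp (ch : Char) (l : List Char) :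
    l = List.replicate (pvSpan ch l).1 ch ++ (pvSpan ch l).2 := by
  induction l with
  | nil => rfl
  | cons c t ih =>
    by_cases h : c = ch
    · simp only [pvSpan, if_pos h, List.replicate_succ, List.cons_append]
      rw [h, ← ih]
    · simp [pvSpan, h]

theorem pvSpan_head (ch : Char) (l : List Char) :
    ∀ x, ((pvSpan ch l).2)[0]? = some x → x ≠ ch := by
  induction l with
  | nil => intro x h; simp [pvSpan] at h
  | cons c t ih =>
    intro x h
    by_cases hc : c = ch
    · simp only [pvSpan, if_pos hc] at h
      exact ih x h
    · simp only [pvSpan, if_neg hc] at h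
      simp at h
      rw [← h]
      exact hc

theorem pvSpan_zero (ch : Char) (l : List Char) (h : (pvSpan ch l).1 = 0) :
    (pvSpan ch l).2 = l := by
  cases l with
  | nil => rfl
  | cons c t =>
    by_cases hc : c = ch
    · simp [pvSpan, hc] at h
    · simp [pvSpan, hc]

theorem pvSpan_len (ch : Char) (l : List Char) :
    (pvSpan ch l).1 + (pvSpan ch l).2.length = l.length := by
  have := congrArg List.length (pvSpan_decomp ch l)
  simp at this
  omega

theorem pvBLoop_eq : ∀ (fuel : Nat) (cs : List Char) (result : Int),
    cs.length ≤ fuel → ¬ cs[0]? = some '-' →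
    pvBLoop fuel cs result = result * pvD cs cs.length := by
  intro fuel
  induction fuel with
  | zero =>
    intro cs result hf _
    have : cs = [] := List.eq_nil_of_length_eq_zero (by omega)
    subst this
    show pvBLoop 0 [] result = result * pvD [] 0
    rw [pvBLoop, pvD_zero, mul_one]
  | succ fuel ih =>
    intro cs result hf hhead
    match cs with
    | [] =>
      show pvBLoop (fuel+1) [] result = result * pvD [] 0
      rw [pvBLoop, pvD_zero, mul_one]
    | c :: t =>
      rw [pvBLoop]
      set k := (pvSpan '.' (c :: t)).1 with hkdef
      set r1 := (pvSpan '.' (c :: t)).2 with hr1def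
      set d := (pvSpan '-' r1).1 with hddef
      set r2 := (pvSpan '-' r1).2 with hr2def
      have hdec1 : c :: t = List.replicate k '.' ++ r1 := pvSpan_decomp '.' (c :: t)
      have hdec2 : r1 = List.replicate d '-' ++ r2 := pvSpan_decomp '-' r1
      have hlen1 : k + r1.length = (c :: t).length := pvSpan_len '.' (c :: t)
      have hlen2 : d + r2.length = r1.length := pvSpan_len '-' r1
      by_cases hk0 : k = 0
      · -- head is neither '.' nor '-': the whole count is 0
        rw [if_pos hk0]
        have hr1 : r1 = c :: t := pvSpan_zero '.' (c :: t) hk0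
        have hcd : c ≠ '.' := by
          have h := pvSpan_head '.' (c :: t) c
          rw [← hr1def, hr1] at h
          exact h rfl
        have hcm : c ≠ '-' := fun h => hhead (by rw [h]; rfl)
        rw [pvD_zero_of_bad (c :: t).length (c :: t) 0 c (by simp) rfl hcd hcm]
        ring
      · rw [if_neg hk0]
        have hk1 : 1 ≤ k := by omega
        have hr2head : ¬ r2[0]? = some '-' := fun h => pvSpan_head '-' r1 '-' (by rw [← hr2def]; exact h) rfl
        by_cases hd0 : d = 0
        · rw [if_pos hd0]
          have hr2r1 : r2 = r1 := pvSpan_zero '-' r1 hd0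
          by_cases hnil : r2 = []
          · rw [if_pos hnil]
            have hr1nil : r1 = [] := hr2r1.symm.trans hnil
            have hrep : c :: t = List.replicate k '.' := by
              rw [hdec1, hr1nil, List.append_nil]
            rw [hrep, List.length_replicate, pvD_dots, pvComp_eq]
          · rw [if_neg hnil]
            -- r1 = r2 starts with a character that is neither '.' nor '-'
            cases hr1c : r1 with
            | nil => exact absurd (hr2r1.trans hr1c) hnil
            | cons a s =>
              have hx : r1[0]? = some a := by rw [hr1c]; rfl
              have hxd : a ≠ '.' := pvSpan_head '.' (c :: t) a (by rw [← hr1def]; exact hx)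
              have hxm : a ≠ '-' := pvSpan_head '-' r1 a (by rw [← hr2def, hr2r1]; exact hx)
              have hr1len : 1 ≤ r1.length := by rw [hr1c]; simp
              have hbad : (c :: t)[k]? = some a := by
                rw [hdec1, List.getElem?_append_right (by simp)]
                simpa using hx
              rw [pvD_zero_of_bad (c :: t).length (c :: t) k a (by omega) hbad hxd hxm]
              ring
        · rw [if_neg hd0]
          have hd1 : 1 ≤ d := by omega
          -- P = dot run ++ dash run, Q = r2
          have hPlen : (List.replicate k '.' ++ List.replicate d '-').length = k + d := by simp
          have hdecomp : c :: t = (List.replicate k '.' ++ List.replicate d '-') ++ r2 := by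
            rw [hdec1, hdec2, List.append_assoc]
          have hPlast : (List.replicate k '.' ++ List.replicate d '-')[(List.replicate k '.' ++ List.replicate d '-').length - 1]? = some '-' := by
            rw [hPlen, pvRD_get, if_neg (by omega), if_pos (by omega)]
          have hfact : pvD (c :: t) (c :: t).length =
              pvD (List.replicate k '.' ++ List.replicate d '-') (List.replicate k '.' ++ List.replicate d '-').length * pvD r2 r2.length := by
            conv_lhs => rw [hdecomp]
            rw [show ((List.replicate k '.' ++ List.replicate d '-') ++ r2).length
                = (List.replicate k '.' ++ List.replicate d '-').length + r2.length by simp; omega]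
            exact pvD_factor _ r2 (by rw [hPlen]; omega) hPlast hr2head r2.length le_rfl
          have hW : pvD (List.replicate k '.' ++ List.replicate d '-') (List.replicate k '.' ++ List.replicate d '-').length =
              (if d % 3 = 0 then pvF k
               else if d % 3 = 1 then pvF (k-1) + (if 2 ≤ k then pvF (k-2) else 0)
               else 0) := by
            rw [hPlen]
            exact pvW d k hk1
          have hfuel : r2.length ≤ fuel := by omega
          rw [ih r2 _ hfuel hr2head, hfact, hW]
          rw [pvComp_eq, pvComp_eq, pvComp_eq]
          ring

-- ===== VERDICT (by name: the statement is the Claim_ definition above) =====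
theorem countVowelSequences_spec : Claim_unchanged_countVowelSequences := by
  intro s _ hD
  show countVowelSequences s = countVowelSequences_alt s
  have hne : s.toList ≠ ['.'] := fun h => hD (String.toList_inj.mp h)
  have hstart : PySem.Str.startswith s "-" = true ↔ s.toList[0]? = some '-' := by
    rw [PySem.Str.startswith_eq, PySem.Chars.startswith_iff]
    constructor
    · rintro ⟨t, ht⟩
      rw [show "-".toList = ['-'] from rfl] at ht
      rw [← ht]
      rfl
    · intro h
      cases hh : s.toList with
      | nil => rw [hh] at h; simp at h
      | cons a t =>
        rw [hh] at h
        simp at h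
        exact ⟨t, by rw [show "-".toList = ['-'] from rfl, h]; rfl⟩
  by_cases hdash : s.toList[0]? = some '-'
  · -- both sides return 0
    have hget : PySem.List.pyGetD s.toList 0 ' ' = '-' := by
      rw [PySem.List.pyGetD_zero, List.getD_eq_getElem?_getD, hdash]
      rfl
    have hpos : 0 < s.toList.length := by
      cases hh : s.toList with
      | nil => rw [hh] at hdash; simp at hdash
      | cons a t => simp [hh]
    obtain ⟨m, hm⟩ : ∃ m, s.toList.length = m + 1 := ⟨s.toList.length - 1, by omega⟩
    simp only [countVowelSequences, countVowelSequences_alt]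
    rw [hm, pvALoop, if_pos hget, if_pos (hstart.mpr hdash)]
  · have hget : ¬ PySem.Str.startswith s "-" = true := fun h => hdash (hstart.mp h)
    simp only [countVowelSequences, countVowelSequences_alt]
    rw [if_neg hget]
    rw [pvBLoop_eq s.toList.length s.toList 1 le_rfl hdash, one_mul]
    rw [pvTbl_zero, pvALoop_inv s.toList hdash hne s.toList.length 0 (by omega) (by omega)]

theorem countVowelSequences_changed : Claim_changed_countVowelSequences := by
  unfold Claim_changed_countVowelSequences; decide

theorem countVowelSequences_tight : Claim_exact_countVowelSequences := by
  unfold Claim_exact_countVowelSequences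
  intro s _ hD
  rw [show s = "." from hD]
  decide
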